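-- pv_equiv track=rewrite | github.com/MartinKondor/KincoVarConverter | csv_creator.py | determine_addr_values
-- ===== SOURCE A (Python) =====
-- from typing import List
--
-- def determine_addr_type(addr_type_name: str) -> str:
--     addr_type_name = addr_type_name.lower().strip()
--     try:
--         return {
--             "iw": "0", "i": "0",
--             "qw": "1", "q": "1",
--             "mw": "2", "m": "2",
--             "aiw": "3", "ai": "3",
--             "vw": "5", "v": "5",
--             "vr": "9",
--         }[addr_type_name]
--     except:
--         return "0"
--
-- def determine_addr_values(addr_tag: str) -> List[str]:
--     """
--     :example input: "%AIW2", "%Q1.0"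
--     :returns: [addr_type_num, addr_type_name]
--     """
--     addr_tag = addr_tag[1:]
--     clean_addr_tag = ""
--
--     addr_type = "0"
--     addr_code_type = "0"
--
--     addr = ""
--     addr_type_name = ""
--
--     in_addr = True
--
--     for ch in addr_tag:
--         if ch.isnumeric():
--             in_addr = False
--
--         if in_addr:
--             addr_type_name += ch
--         if not in_addr:
--             addr += ch
--
--     addr_type = determine_addr_type(addr_type_name)
--
--     # "AddrType"	"Addr"	"AddrCodeType"	"AddrTypeName"
--     return addr_type, addr, addr_code_type, addr_type_name
-- ===== SOURCE B (Python) =====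
-- def determine_addr_type(addr_type_name: str) -> str:
--     addr_type_name = addr_type_name.lower().strip()
--     return {
--         "iw": "0", "i": "0",
--         "qw": "1", "q": "1",
--         "mw": "2", "m": "2",
--         "aiw": "3", "ai": "3",
--         "vw": "5", "v": "5",
--         "vr": "9",
--     }.get(addr_type_name, "0")
--
-- def determine_addr_values(addr_tag: str):
--     addr_tag = addr_tag[1:]
--     idx = next((i for i, ch in enumerate(addr_tag) if ch.isnumeric()), len(addr_tag))
--     addr_type_name = addr_tag[:idx]
--     addr = addr_tag[idx:]
--     return determine_addr_type(addr_type_name), addr, "0", addr_type_name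
-- ===== Notes on version B (the rewrite author's own statement) =====
-- stated objective: simpler
-- what changed: Replaces A's stateful character loop (in_addr flag with two growing accumulators) by finding the index of the first numeric character and slicing the tag into prefix/suffix, with the lookup's try/except replaced by dict.get.
import Mathlib
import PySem

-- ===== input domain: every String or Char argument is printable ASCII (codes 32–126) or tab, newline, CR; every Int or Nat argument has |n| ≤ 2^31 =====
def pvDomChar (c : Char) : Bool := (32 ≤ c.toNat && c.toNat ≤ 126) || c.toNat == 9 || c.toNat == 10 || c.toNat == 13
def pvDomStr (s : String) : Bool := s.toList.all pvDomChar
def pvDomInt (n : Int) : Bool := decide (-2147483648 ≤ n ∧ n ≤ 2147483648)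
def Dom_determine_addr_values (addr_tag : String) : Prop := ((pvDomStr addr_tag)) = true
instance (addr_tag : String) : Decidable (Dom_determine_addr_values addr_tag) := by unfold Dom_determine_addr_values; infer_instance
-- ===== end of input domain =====

-- B replaces A's stateful in_addr loop by find-first-digit-index then slice (simpler decomposition, same O(n) cost).


-- shared helper: determine_addr_type (identical in A and B up to try/except vs .get, both = getD)
def determine_addr_typeP (addr_type_name : String) : String :=
  let s := PySem.Str.strip (PySem.Str.lower addr_type_name)
  PySem.Dict.getD (PySem.Dict.ofList
    [("iw", "0"), ("i", "0"), ("qw", "1"), ("q", "1"), ("mw", "2"), ("m", "2"),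
     ("aiw", "3"), ("ai", "3"), ("vw", "5"), ("v", "5"), ("vr", "9")]) s "0"

-- ===== PORT A =====
-- ch.isnumeric() ported as Chars.isdigit: exact on the printable-ASCII domain (they differ only outside ASCII)
def pvStepA (s : Bool × List Char × List Char) (ch : Char) : Bool × List Char × List Char :=
  let in_addr := if PySem.Chars.isdigit ch then false else s.1
  let name := if in_addr then s.2.1 ++ [ch] else s.2.1
  let addr := if !in_addr then s.2.2 ++ [ch] else s.2.2
  (in_addr, name, addr)

def determine_addr_values (addr_tag : String) : String × String × String × String :=
  let tag := PySem.List.slice addr_tag.toList (some 1) none   -- addr_tag[1:]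
  let st := tag.foldl pvStepA (true, [], [])
  let addr_type := determine_addr_typeP (String.ofList st.2.1)
  (addr_type, String.ofList st.2.2, "0", String.ofList st.2.1)

-- ===== PORT B =====
def determine_addr_values_alt (addr_tag : String) : String × String × String × String :=
  let tag := PySem.List.slice addr_tag.toList (some 1) none   -- addr_tag[1:]
  let idx := tag.findIdx PySem.Chars.isdigit                  -- next(…, len) : length if no digit
  let addr_type_name := tag.take idx
  let addr := tag.drop idx
  (determine_addr_typeP (String.ofList addr_type_name), String.ofList addr, "0", String.ofList addr_type_name)

-- ===== PRECONDITION & SPEC =====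
def Spec_determine_addr_values (addr_tag : String) (out : String × String × String × String) : Prop := out = determine_addr_values_alt addr_tag
instance (addr_tag : String) (out : String × String × String × String) : Decidable (Spec_determine_addr_values addr_tag out) := by unfold Spec_determine_addr_values; infer_instance

-- ===== CLAIM (what is proved, stated in full; the proofs are below) =====
def Claim_equal_determine_addr_values : Prop := ∀ (addr_tag : String), Dom_determine_addr_values addr_tag → Spec_determine_addr_values addr_tag (determine_addr_values addr_tag)

-- ===== LEMMAS AND PROOFS =====

lemma pvFoldFalse (l : List Char) (n a : List Char) :
    l.foldl pvStepA (false, n, a) = (false, n, a ++ l) := by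
  induction l generalizing a with
  | nil => simp
  | cons c t ih => simp [pvStepA, List.foldl_cons, ih]

lemma pvFoldTrue (l : List Char) (n a : List Char) :
    l.foldl pvStepA (true, n, a) =
      ((l.foldl pvStepA (true, n, a)).1,
       n ++ l.takeWhile (fun c => !PySem.Chars.isdigit c),
       a ++ l.dropWhile (fun c => !PySem.Chars.isdigit c)) := by
  induction l generalizing n a with
  | nil => simp
  | cons c t ih =>
    by_cases h : PySem.Chars.isdigit c
    · simp [List.foldl_cons, pvStepA, h, pvFoldFalse, List.takeWhile, List.dropWhile]
    · rw [List.foldl_cons]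
      simp only [pvStepA, h]
      norm_num
      rw [ih (n ++ [c]) a]
      simp [List.takeWhile, List.dropWhile, h]

lemma pvTakeFindIdx (p : Char → Bool) (l : List Char) :
    l.take (l.findIdx p) = l.takeWhile (fun c => !p c) ∧
    l.drop (l.findIdx p) = l.dropWhile (fun c => !p c) := by
  induction l with
  | nil => simp
  | cons c t ih =>
    by_cases h : p c
    · simp [List.findIdx_cons, h, List.takeWhile, List.dropWhile]
    · simp [List.findIdx_cons, h, List.takeWhile, List.dropWhile, ih.1, ih.2]

-- ===== VERDICT (by name: the statement is the Claim_ definition above) =====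
theorem determine_addr_values_spec : Claim_equal_determine_addr_values := by
  intro addr_tag _
  unfold Spec_determine_addr_values
  simp only [determine_addr_values, determine_addr_values_alt]
  rw [pvFoldTrue, (pvTakeFindIdx PySem.Chars.isdigit _).1, (pvTakeFindIdx PySem.Chars.isdigit _).2]
  simp
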